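-- pv_equiv track=rewrite | github.com/showlab/TrustScorer | server/assistgui/planner/demonstration_manager.py | filter_demonstration
-- ===== SOURCE A (Python) =====
-- def filter_demonstration(demonstration, keys):
--     filtered_demonstration = []
--     for act in demonstration:
--         act = act.split("\n")
--         filtered_act = "\n".join([elem for elem in act if not any([key in elem for key in keys])])
--         if filtered_act:
--             filtered_demonstration.append(filtered_act)
--
--     return filtered_demonstration
-- ===== SOURCE B (Python) =====
-- def filter_demonstration(demonstration, keys):
--     # key-major: successively filter the line list by each key, skipping keys
--     # that do not occur anywhere in the act (no line can contain them then)
--     result = []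
--     for act in demonstration:
--         lines = act.split("\n")
--         for key in keys:
--             if key in act:
--                 lines = [line for line in lines if key not in line]
--         joined = "\n".join(lines)
--         if joined:
--             result.append(joined)
--     return result
-- ===== Notes on version B (the rewrite author's own statement) =====
-- stated objective: alternative
-- what changed: Replaces A's per-line any(key in elem for key in keys) test with a key-major pass that successively filters the line list by one key at a time, skipping keys absent from the whole act; proved equal to A's conjunctive per-line filter via a split-pieces-are-infixes lemma.
import Mathlib
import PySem

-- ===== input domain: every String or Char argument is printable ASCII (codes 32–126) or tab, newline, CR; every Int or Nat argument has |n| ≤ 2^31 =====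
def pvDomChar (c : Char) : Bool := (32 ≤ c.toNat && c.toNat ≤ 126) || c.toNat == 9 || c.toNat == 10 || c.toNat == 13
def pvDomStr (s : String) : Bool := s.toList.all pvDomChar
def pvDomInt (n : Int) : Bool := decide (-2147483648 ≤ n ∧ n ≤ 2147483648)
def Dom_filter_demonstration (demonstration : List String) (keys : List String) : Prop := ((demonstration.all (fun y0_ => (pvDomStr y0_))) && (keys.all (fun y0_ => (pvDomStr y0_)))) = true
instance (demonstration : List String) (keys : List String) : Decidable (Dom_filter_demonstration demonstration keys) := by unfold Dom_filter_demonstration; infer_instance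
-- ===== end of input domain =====

-- B replaces A's per-line `any(key in elem for key in keys)` with a key-major pass that
-- successively filters the line list by each key, skipping keys absent from the whole act.

-- ===== PORT A =====
def filter_demonstration (demonstration : List String) (keys : List String) : List String :=
  demonstration.foldl
    (fun filtered_demonstration act =>
      -- act.split("\n"): sep is nonempty, so split? is always `some` and getD is exact
      let actLines := (PySem.Str.split? act "\n").getD []
      let filtered_act := PySem.Str.join "\n"
        (actLines.filter (fun elem => !(keys.any (fun key => PySem.Str.isIn key elem))))
      if filtered_act = "" then filtered_demonstration
      else filtered_demonstration ++ [filtered_act])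
    []

-- ===== PORT B =====
def filter_demonstration_alt (demonstration : List String) (keys : List String) : List String :=
  demonstration.foldl
    (fun result act =>
      let lines := keys.foldl
        (fun lines key =>
          if PySem.Str.isIn key act
          then lines.filter (fun line => !(PySem.Str.isIn key line))
          else lines)
        ((PySem.Str.split? act "\n").getD [])
      let joined := PySem.Str.join "\n" lines
      if joined = "" then result else result ++ [joined])
    []

-- ===== PRECONDITION & SPEC =====
def Spec_filter_demonstration (demonstration : List String) (keys : List String) (out : List String) : Prop := out = filter_demonstration_alt demonstration keys
instance (demonstration : List String) (keys : List String) (out : List String) : Decidable (Spec_filter_demonstration demonstration keys out) := by unfold Spec_filter_demonstration; infer_instance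

-- ===== CLAIM (what is proved, stated in full; the proofs are below) =====
def Claim_equal_filter_demonstration : Prop := ∀ (demonstration : List String) (keys : List String), Dom_filter_demonstration demonstration keys → Spec_filter_demonstration demonstration keys (filter_demonstration demonstration keys)

-- ===== LEMMAS AND PROOFS =====

-- every piece produced by splitOn.go is an infix of the original string s
theorem splitOn_go_infix (sep s : List Char) (fuel : Nat) :
    ∀ (l cur : List Char) (acc : List (List Char)),
      (∀ q ∈ acc, q <:+: s) → cur.reverse ++ l <:+: s →
      ∀ p ∈ PySem.Chars.splitOn.go sep fuel l cur acc, p <:+: s := by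
  induction fuel with
  | zero =>
    intro l cur acc hacc hcl p hp
    simp only [PySem.Chars.splitOn.go, List.mem_reverse, List.mem_cons] at hp
    rcases hp with h | h
    · exact h ▸ hcl
    · exact hacc p h
  | succ n ih =>
    intro l cur acc hacc hcl p hp
    cases l with
    | nil =>
      simp only [PySem.Chars.splitOn.go, List.mem_reverse, List.mem_cons] at hp
      rcases hp with h | h
      · subst h
        simpa using hcl
      · exact hacc p h
    | cons c rest =>
      rw [show PySem.Chars.splitOn.go sep (n+1) (c :: rest) cur acc
            = if sep.isPrefixOf (c :: rest) = true
              then PySem.Chars.splitOn.go sep n (List.drop sep.length (c :: rest)) [] (cur.reverse :: acc)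
              else PySem.Chars.splitOn.go sep n rest (c :: cur) acc
          from rfl] at hp
      by_cases hpre : sep.isPrefixOf (c :: rest) = true
      · rw [if_pos hpre] at hp
        refine ih _ _ _ ?_ ?_ p hp
        · intro q hq
          rcases List.mem_cons.mp hq with h | h
          · subst h
            exact List.IsInfix.trans ((List.prefix_append _ _).isInfix) hcl
          · exact hacc q h
        · simpa using List.IsInfix.trans (List.drop_suffix sep.length (c :: rest)).isInfix
            (List.IsInfix.trans (List.suffix_append _ _).isInfix hcl)
      · rw [if_neg hpre] at hp
        refine ih _ _ _ hacc ?_ p hp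
        simpa using hcl
theorem mem_splitOn_infix (s sep p : List Char) (hp : p ∈ PySem.Chars.splitOn s sep) : p <:+: s := by
  exact splitOn_go_infix sep s (s.length + 1) s [] [] (by simp) (by simp) p hp

-- every line of act.split("\n") is an infix of act
theorem mem_split_lines_infix (act : String) (l : String)
    (hl : l ∈ (PySem.Str.split? act "\n").getD []) : l.toList <:+: act.toList := by
  simp only [PySem.Str.split?, PySem.Chars.split?,
    show ("\n" : String).toList = ['\n'] from by decide] at hl
  simp only [List.isEmpty_cons, Bool.false_eq_true, if_false, Option.map_some, Option.getD_some,
    List.mem_map] at hl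
  obtain ⟨cs, hcs, rfl⟩ := hl
  rw [String.toList_ofList]
  exact mem_splitOn_infix _ _ _ hcs

-- a key absent from act filters nothing, so B's skip-guard can be dropped
theorem guarded_foldl_eq (act : String) (keys : List String) :
    ∀ (lines : List String), (∀ l ∈ lines, l.toList <:+: act.toList) →
      keys.foldl (fun lines key =>
          if PySem.Str.isIn key act
          then lines.filter (fun line => !(PySem.Str.isIn key line))
          else lines) lines
      = keys.foldl (fun lines key => lines.filter (fun line => !(PySem.Str.isIn key line))) lines := by
  induction keys with
  | nil => intro lines _; rfl
  | cons k ks ih =>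
    intro lines h
    simp only [List.foldl_cons]
    by_cases hk : PySem.Str.isIn k act = true
    · rw [if_pos hk]
      exact ih _ (fun l hl => h l (List.mem_filter.mp hl).1)
    · rw [if_neg hk]
      have hfix : lines.filter (fun line => !(PySem.Str.isIn k line)) = lines := by
        apply List.filter_eq_self.mpr
        intro l hl
        simp only [Bool.not_eq_eq_eq_not, Bool.not_true]
        rw [show PySem.Str.isIn k l = PySem.Chars.isIn k.toList l.toList from rfl]
        rw [PySem.Chars.isIn_eq_false_iff]
        intro hinf
        exact hk (PySem.Str.isIn_iff_infix k act |>.mpr (hinf.trans (h l hl)))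
      rw [hfix]
      exact ih _ h

-- filtering the line list by each key in turn = one filter by "no key occurs"
theorem foldl_filter_keys (keys : List String) (ls : List String) :
    keys.foldl (fun lines key => lines.filter (fun line => !(PySem.Str.isIn key line))) ls
      = ls.filter (fun line => !(keys.any (fun key => PySem.Str.isIn key line))) := by
  induction keys generalizing ls with
  | nil => simp
  | cons k ks ih =>
    simp only [List.foldl_cons, ih, List.filter_filter, List.any_cons]
    congr 1
    funext line
    cases PySem.Str.isIn k line <;> simp

-- ===== VERDICT (by name: the statement is the Claim_ definition above) =====
theorem filter_demonstration_spec : Claim_equal_filter_demonstration := by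
  intro demonstration keys _
  unfold Spec_filter_demonstration filter_demonstration filter_demonstration_alt
  have hstep : ∀ (result : List String) (act : String),
      (fun result act =>
        let lines := keys.foldl
          (fun lines key =>
            if PySem.Str.isIn key act
            then lines.filter (fun line => !(PySem.Str.isIn key line))
            else lines)
          ((PySem.Str.split? act "\n").getD [])
        let joined := PySem.Str.join "\n" lines
        if joined = "" then result else result ++ [joined]) result act
      = (fun filtered_demonstration act =>
        let actLines := (PySem.Str.split? act "\n").getD []
        let filtered_act := PySem.Str.join "\n"
          (actLines.filter (fun elem => !(keys.any (fun key => PySem.Str.isIn key elem))))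
        if filtered_act = "" then filtered_demonstration
        else filtered_demonstration ++ [filtered_act]) result act := by
    intro result act
    simp only
    rw [guarded_foldl_eq act keys _ (fun l hl => mem_split_lines_infix act l hl),
        foldl_filter_keys]
  rw [show (fun result act =>
        let lines := keys.foldl
          (fun lines key =>
            if PySem.Str.isIn key act
            then lines.filter (fun line => !(PySem.Str.isIn key line))
            else lines)
          ((PySem.Str.split? act "\n").getD [])
        let joined := PySem.Str.join "\n" lines
        if joined = "" then result else result ++ [joined])
      = (fun filtered_demonstration act =>
        let actLines := (PySem.Str.split? act "\n").getD []
        let filtered_act := PySem.Str.join "\n"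
          (actLines.filter (fun elem => !(keys.any (fun key => PySem.Str.isIn key elem))))
        if filtered_act = "" then filtered_demonstration
        else filtered_demonstration ++ [filtered_act])
      from funext fun r => funext fun a => hstep r a]
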